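-- pv_equiv track=rewrite | github.com/csaratchandra/ProductOS | core/python/productos_runtime/doc_ingestion.py | _heuristic_extract_entities
-- ===== SOURCE A (Python) =====
-- def _heuristic_extract_entities(content: str) -> dict[str, list[str]]:
--     """Fallback entity extraction using pattern matching."""
--     entities: dict[str, list[str]] = {
--         "problems": [],
--         "personas": [],
--         "features": [],
--         "decisions": [],
--         "competitors": [],
--         "metrics": [],
--     }
--
--     lines = content.splitlines()
--     for line in lines:
--         lower = line.strip().lower()
--         if not lower:
--             continue
--
--         if any(k in lower for k in ("problem", "pain point", "challenge", "frustration")):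
--             entities["problems"].append(line.strip()[:120])
--
--         if any(k in lower for k in ("persona", "user role", "who will", "target user")):
--             entities["personas"].append(line.strip()[:120])
--
--         if any(k in lower for k in ("feature", "capability", "functionality", "ability to")):
--             entities["features"].append(line.strip()[:120])
--
--         if any(k in lower for k in ("decision", "decided", "chose", "selected", "opted")):
--             entities["decisions"].append(line.strip()[:120])
--
--         if any(k in lower for k in ("competitor", "alternative", "versus", "vs ")):
--             entities["competitors"].append(line.strip()[:120])
--
--         if any(k in lower for k in ("kpi", "metric", "target", "goal", "%", "increase")):
--             entities["metrics"].append(line.strip()[:120])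
--
--     return entities
-- ===== SOURCE B (Python) =====
-- def _heuristic_extract_entities(content: str) -> dict[str, list[str]]:
--     """Fallback entity extraction using pattern matching (data-driven, per-category)."""
--     categories = {
--         "problems": ("problem", "pain point", "challenge", "frustration"),
--         "personas": ("persona", "user role", "who will", "target user"),
--         "features": ("feature", "capability", "functionality", "ability to"),
--         "decisions": ("decision", "decided", "chose", "selected", "opted"),
--         "competitors": ("competitor", "alternative", "versus", "vs "),
--         "metrics": ("kpi", "metric", "target", "goal", "%", "increase"),
--     }
--     return {
--         name: [
--             line.strip()[:120]
--             for line in content.splitlines()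
--             if (lower := line.strip().lower()) and any(k in lower for k in kws)
--         ]
--         for name, kws in categories.items()
--     }
-- ===== Notes on version B (the rewrite author's own statement) =====
-- stated objective: simpler
-- what changed: A's six unrolled per-line keyword blocks appending into a mutable dict are replaced by an ordered category->keywords table and one per-category list comprehension over the lines (category-major instead of line-major traversal).
import Mathlib
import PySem

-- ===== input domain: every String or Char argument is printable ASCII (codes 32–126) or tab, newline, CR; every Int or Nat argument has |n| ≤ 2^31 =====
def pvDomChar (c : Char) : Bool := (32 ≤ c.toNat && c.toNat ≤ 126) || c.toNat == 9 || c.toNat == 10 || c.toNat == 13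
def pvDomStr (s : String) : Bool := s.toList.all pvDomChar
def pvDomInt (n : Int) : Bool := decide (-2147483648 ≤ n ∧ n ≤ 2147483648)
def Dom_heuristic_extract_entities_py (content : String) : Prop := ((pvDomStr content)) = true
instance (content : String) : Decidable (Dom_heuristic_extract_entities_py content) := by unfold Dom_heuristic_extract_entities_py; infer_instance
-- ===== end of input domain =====

-- B replaces A's six unrolled per-line keyword blocks by one data-driven per-category list
-- comprehension over the same lines (objective: simpler).

-- ===== PORT A =====
def pvStepA (d : PySem.Dict String (List String)) (line : String) : PySem.Dict String (List String) :=
  let lower := PySem.Str.lower (PySem.Str.strip line)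
  if PySem.Str.len lower == 0 then d
  else
    let d := if ["problem","pain point","challenge","frustration"].any (fun k => PySem.Str.isIn k lower)
             then d.modify "problems" [] (fun v => v ++ [PySem.Str.slice (PySem.Str.strip line) none (some 120)]) else d
    let d := if ["persona","user role","who will","target user"].any (fun k => PySem.Str.isIn k lower)
             then d.modify "personas" [] (fun v => v ++ [PySem.Str.slice (PySem.Str.strip line) none (some 120)]) else d
    let d := if ["feature","capability","functionality","ability to"].any (fun k => PySem.Str.isIn k lower)
             then d.modify "features" [] (fun v => v ++ [PySem.Str.slice (PySem.Str.strip line) none (some 120)]) else d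
    let d := if ["decision","decided","chose","selected","opted"].any (fun k => PySem.Str.isIn k lower)
             then d.modify "decisions" [] (fun v => v ++ [PySem.Str.slice (PySem.Str.strip line) none (some 120)]) else d
    let d := if ["competitor","alternative","versus","vs "].any (fun k => PySem.Str.isIn k lower)
             then d.modify "competitors" [] (fun v => v ++ [PySem.Str.slice (PySem.Str.strip line) none (some 120)]) else d
    let d := if ["kpi","metric","target","goal","%","increase"].any (fun k => PySem.Str.isIn k lower)
             then d.modify "metrics" [] (fun v => v ++ [PySem.Str.slice (PySem.Str.strip line) none (some 120)]) else d
    d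
def heuristic_extract_entities_py (content : String) : List (String × List String) :=
  let entities : PySem.Dict String (List String) :=
    PySem.Dict.ofList [("problems", []), ("personas", []), ("features", []),
                       ("decisions", []), ("competitors", []), ("metrics", [])]
  let lines := PySem.Str.splitlines content
  (lines.foldl pvStepA entities).items

-- ===== PORT B =====
def pvCategories : List (String × List String) :=
  [("problems", ["problem","pain point","challenge","frustration"]),
   ("personas", ["persona","user role","who will","target user"]),
   ("features", ["feature","capability","functionality","ability to"]),
   ("decisions", ["decision","decided","chose","selected","opted"]),
   ("competitors", ["competitor","alternative","versus","vs "]),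
   ("metrics", ["kpi","metric","target","goal","%","increase"])]
def pvHit (kws : List String) (line : String) : Option String :=
  let lower := PySem.Str.lower (PySem.Str.strip line)
  if PySem.Str.len lower != 0 && kws.any (fun k => PySem.Str.isIn k lower)
  then some (PySem.Str.slice (PySem.Str.strip line) none (some 120)) else none
def heuristic_extract_entities_py_alt (content : String) : List (String × List String) :=
  pvCategories.map (fun nk => (nk.1, (PySem.Str.splitlines content).filterMap (pvHit nk.2)))

-- ===== PRECONDITION & SPEC =====
def Spec_heuristic_extract_entities_py (content : String) (out : List (String × List String)) : Prop := out = heuristic_extract_entities_py_alt content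
instance (content : String) (out : List (String × List String)) : Decidable (Spec_heuristic_extract_entities_py content out) := by unfold Spec_heuristic_extract_entities_py; infer_instance

-- ===== CLAIM (what is proved, stated in full; the proofs are below) =====
def Claim_equal_heuristic_extract_entities_py : Prop := ∀ (content : String), Dom_heuristic_extract_entities_py content → Spec_heuristic_extract_entities_py content (heuristic_extract_entities_py content)

-- ===== LEMMAS AND PROOFS =====

def pvNames : List String := ["problems","personas","features","decisions","competitors","metrics"]


lemma condModify_getD (d : PySem.Dict String (List String)) (c : Prop) [Decidable c]
    (k n : String) (x : String) :
    (if c then d.modify k [] (fun v => v ++ [x]) else d).getD n []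
      = d.getD n [] ++ (if c ∧ n = k then [x] else []) := by
  split_ifs with hc hk
  · rcases hk with ⟨_, hk⟩
    subst hk
    simp [PySem.Dict.getD_modify_self]
  · rw [PySem.Dict.getD_modify]
    have hnk : ¬ n = k := fun hh => hk ⟨hc, hh⟩
    simp [hnk]
  · simp_all
  · simp

lemma pvStepA_getD (d : PySem.Dict String (List String)) (line : String)
    (name : String) (kws : List String) (h : (name, kws) ∈ pvCategories) :
    (pvStepA d line).getD name [] = d.getD name [] ++ (pvHit kws line).toList := by
  simp only [pvCategories, List.mem_cons, List.not_mem_nil, or_false, Prod.mk.injEq] at h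
  unfold pvStepA pvHit
  by_cases hlen : (PySem.Str.len (PySem.Str.lower (PySem.Str.strip line)) == 0) = true
  · rcases h with ⟨h1,h2⟩|⟨h1,h2⟩|⟨h1,h2⟩|⟨h1,h2⟩|⟨h1,h2⟩|⟨h1,h2⟩ <;> subst h1 <;> subst h2 <;>
      simp [beq_iff_eq] at * <;> simp [hlen]
  · rcases h with ⟨h1,h2⟩|⟨h1,h2⟩|⟨h1,h2⟩|⟨h1,h2⟩|⟨h1,h2⟩|⟨h1,h2⟩ <;> subst h1 <;> subst h2 <;>
      · dsimp only
        rw [if_neg hlen]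
        simp only [condModify_getD]
        simp
        have hne : ¬ (PySem.Chars.lower (PySem.Chars.strip line.toList)) = [] := by simpa using hlen
        split_ifs with h1 h2 <;> simp_all

lemma condModify_pres (d0 d : PySem.Dict String (List String)) (c : Prop) [Decidable c]
    (k : String) (f : List String → List String) (hk : k ∈ pvNames)
    (hd : d.keys = d0.keys ∧ ∀ n ∈ pvNames, d.contains n = true) :
    (if c then d.modify k [] f else d).keys = d0.keys ∧
      ∀ n ∈ pvNames, (if c then d.modify k [] f else d).contains n = true := by
  split_ifs with hc
  · constructor
    · rw [PySem.Dict.keys_modify, PySem.Dict.keys_insert_of_contains _ _ (hd.2 k hk), hd.1]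
    · intro n hn
      simp [PySem.Dict.contains_modify, hd.2 n hn]
  · exact hd

lemma pvStepA_keys (d : PySem.Dict String (List String)) (line : String)
    (h : ∀ n ∈ pvNames, d.contains n = true) :
    (pvStepA d line).keys = d.keys ∧ ∀ n ∈ pvNames, (pvStepA d line).contains n = true := by
  unfold pvStepA
  dsimp only
  by_cases hlen : (PySem.Str.len (PySem.Str.lower (PySem.Str.strip line)) == 0) = true
  · rw [if_pos hlen]; exact ⟨rfl, h⟩
  · rw [if_neg hlen]
    refine condModify_pres d _ _ _ _ (by simp [pvNames]) ?_
    refine condModify_pres d _ _ _ _ (by simp [pvNames]) ?_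
    refine condModify_pres d _ _ _ _ (by simp [pvNames]) ?_
    refine condModify_pres d _ _ _ _ (by simp [pvNames]) ?_
    refine condModify_pres d _ _ _ _ (by simp [pvNames]) ?_
    refine condModify_pres d _ _ _ _ (by simp [pvNames]) ?_
    exact ⟨rfl, h⟩

lemma pvFoldA_keys (lines : List String) (d : PySem.Dict String (List String))
    (h : ∀ n ∈ pvNames, d.contains n = true) :
    (lines.foldl pvStepA d).keys = d.keys := by
  induction lines generalizing d with
  | nil => rfl
  | cons l rest ih =>
    rw [List.foldl_cons, ih (pvStepA d l) (pvStepA_keys d l h).2, (pvStepA_keys d l h).1]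

lemma pvFoldA_getD (lines : List String) (d : PySem.Dict String (List String))
    (name : String) (kws : List String) (h : (name, kws) ∈ pvCategories) :
    (lines.foldl pvStepA d).getD name [] = d.getD name [] ++ lines.filterMap (pvHit kws) := by
  induction lines generalizing d with
  | nil => rw [List.foldl_nil, List.filterMap_nil, List.append_nil]
  | cons l rest ih =>
    rw [List.foldl_cons, ih (pvStepA d l), pvStepA_getD d l name kws h, List.filterMap_cons]
    cases pvHit kws l <;> simp

def pvD0 : PySem.Dict String (List String) :=
  PySem.Dict.ofList [("problems", []), ("personas", []), ("features", []),
                     ("decisions", []), ("competitors", []), ("metrics", [])]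


-- ===== VERDICT (by name: the statement is the Claim_ definition above) =====
theorem heuristic_extract_entities_py_spec : Claim_equal_heuristic_extract_entities_py := by
  intro content _
  unfold Spec_heuristic_extract_entities_py
  show (((PySem.Str.splitlines content)).foldl pvStepA pvD0).items = _
  have h0 : ∀ n ∈ pvNames, pvD0.contains n = true := by decide
  have hk := pvFoldA_keys (PySem.Str.splitlines content) pvD0 h0
  have hnd : ((PySem.Str.splitlines content).foldl pvStepA pvD0).keys.Nodup := by
    rw [hk]; decide
  rw [PySem.Dict.items_eq_map_keys _ hnd [], hk,
      show pvD0.keys = pvNames from by decide]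
  have e : ∀ name kws, (name, kws) ∈ pvCategories →
      ((PySem.Str.splitlines content).foldl pvStepA pvD0).getD name [] =
        (PySem.Str.splitlines content).filterMap (pvHit kws) := by
    intro name kws h
    rw [pvFoldA_getD _ _ _ _ h]
    have : pvD0.getD name [] = [] := by
      simp only [pvCategories, List.mem_cons, List.not_mem_nil, or_false, Prod.mk.injEq] at h
      rcases h with ⟨h1,_⟩|⟨h1,_⟩|⟨h1,_⟩|⟨h1,_⟩|⟨h1,_⟩|⟨h1,_⟩ <;> subst h1 <;> decide
    rw [this, List.nil_append]
  unfold heuristic_extract_entities_py_alt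
  simp only [pvNames, pvCategories, List.map_cons, List.map_nil]
  rw [e "problems" ["problem","pain point","challenge","frustration"] (by simp [pvCategories]), e "personas" ["persona","user role","who will","target user"] (by simp [pvCategories]),
      e "features" ["feature","capability","functionality","ability to"] (by simp [pvCategories]), e "decisions" ["decision","decided","chose","selected","opted"] (by simp [pvCategories]),
      e "competitors" ["competitor","alternative","versus","vs "] (by simp [pvCategories]), e "metrics" ["kpi","metric","target","goal","%","increase"] (by simp [pvCategories])]
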